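-- pv_equiv track=rewrite | github.com/Shubham-Choudhury/GeeksforGeeks-Problems | 2024 March/Possible Paths in a Tree/main.py | maximumWeight
-- ===== SOURCE A (Python) =====
-- def maximumWeight(n, edges, q, queries):
--     uf = list(range(n))
--     sz = [1] * n
--
--     def find(u):
--         if uf[u] != u:
--             uf[u] = find(uf[u])
--         return uf[u]
--
--     edges.sort(key=lambda x: x[2], reverse=True)
--     queries = sorted(enumerate(queries), key=lambda x: x[1])
--
--     res = [0] * q
--     cur = 0
--     for ind, x in queries:
--         while edges and edges[-1][2] <= x:
--             u, v, _ = edges.pop()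
--             u, v = find(u - 1), find(v - 1)
--             if u != v:
--                 uf[u] = v
--                 cur += sz[u] * sz[v]
--                 sz[v] += sz[u]
--         res[ind] = cur
--
--     return res
-- ===== SOURCE B (Python) =====
-- def maximumWeight(n, edges, q, queries):
--     # Return-value equivalence only: A additionally pops the processed edges
--     # from `edges` in place; B only sorts `edges` in place.
--     edges.sort(key=lambda x: x[2], reverse=True)
--     uf = list(range(n))
--     sz = [1] * n
--
--     def find(u):
--         if uf[u] != u:
--             uf[u] = find(uf[u])
--         return uf[u]
--
--     res = [0] * q
--     if queries:
--         cutoff = max(queries)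
--         # One pass over the relevant edges in ascending weight order, recording
--         # a prefix table: after each edge, (its weight, running pair count).
--         table = []
--         cur = 0
--         for u, v, w in reversed(edges):
--             if w > cutoff:
--                 break
--             u, v = find(u - 1), find(v - 1)
--             if u != v:
--                 uf[u] = v
--                 cur += sz[u] * sz[v]
--                 sz[v] += sz[u]
--             table.append((w, cur))
--         # Answer each query in its original order from the prefix table.
--         for i, x in enumerate(queries):
--             ans = 0
--             for w, c in table:
--                 if w > x:
--                     break
--                 ans = c
--             res[i] = ans
--     return res
-- ===== Notes on version B (the rewrite author's own statement) =====
-- stated objective: alternative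
-- what changed: Instead of sorting the queries with their indices and interleaving union-find merges with answering them into a scattered result array, B makes one pass over the edges of weight <= max(queries) in ascending order building a prefix table of (weight, running pair count) and then answers each query independently, in original order, by scanning that table.
import Mathlib
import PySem

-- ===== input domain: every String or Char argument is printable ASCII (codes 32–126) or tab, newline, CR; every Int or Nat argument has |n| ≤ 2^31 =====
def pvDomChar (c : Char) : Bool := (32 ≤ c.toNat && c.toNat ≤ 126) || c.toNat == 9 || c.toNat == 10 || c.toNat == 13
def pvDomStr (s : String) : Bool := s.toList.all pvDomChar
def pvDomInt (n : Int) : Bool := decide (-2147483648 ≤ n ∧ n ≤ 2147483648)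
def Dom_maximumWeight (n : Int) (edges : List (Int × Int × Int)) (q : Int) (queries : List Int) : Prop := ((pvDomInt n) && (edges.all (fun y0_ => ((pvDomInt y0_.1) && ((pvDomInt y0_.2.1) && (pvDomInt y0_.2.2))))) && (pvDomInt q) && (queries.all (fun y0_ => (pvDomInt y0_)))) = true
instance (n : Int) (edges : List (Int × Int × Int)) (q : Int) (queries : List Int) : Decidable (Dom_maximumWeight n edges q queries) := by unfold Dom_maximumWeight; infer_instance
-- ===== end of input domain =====

-- B replaces A's sorted-query sweep by a prefix table built in one pass plus a per-query
-- scan (objective: alternative decomposition). Return-value equivalence only: A also pops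
-- the processed edges from `edges` in place, B only sorts `edges` in place.

-- ===== PORT A =====
-- Shared union-find core: both Pythons contain the identical `find` helper and merge step.
-- Python negative-index semantics for uf[u] / sz[u]:
def pvIdx (len : Nat) (i : Int) : Nat := (if i < 0 then i + len else i).toNat

def pvGetI (l : List Int) (i : Int) : Int := l.getD (pvIdx l.length i) 0

def pvSetI (l : List Int) (i : Int) (v : Int) : List Int := l.set (pvIdx l.length i) v

-- `find` with path compression; fuel makes the recursion structural (the fallback is
-- unreachable on inputs where the Python returns).
def pvFind : List Int → Nat → Int → List Int × Int
  | uf, 0, u => (uf, u)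
  | uf, f + 1, u =>
    let p := pvGetI uf u
    if p ≠ u then
      let r := pvFind uf f p
      (pvSetI r.1 u r.2, r.2)
    else (uf, p)

-- one edge: u, v = find(u-1), find(v-1); if u != v: uf[u]=v; cur += sz[u]*sz[v]; sz[v] += sz[u]
def pvStep (st : List Int × List Int × Int) (e : Int × Int × Int) : List Int × List Int × Int :=
  let fu := pvFind st.1 (st.1.length + 1) (e.1 - 1)
  let fv := pvFind fu.1 (fu.1.length + 1) (e.2.1 - 1)
  if fu.2 ≠ fv.2 then
    (pvSetI fv.1 fu.2 fv.2,
     pvSetI st.2.1 fv.2 (pvGetI st.2.1 fv.2 + pvGetI st.2.1 fu.2),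
     st.2.2 + pvGetI st.2.1 fu.2 * pvGetI st.2.1 fv.2)
  else (fv.1, st.2.1, st.2.2)

-- A's inner `while edges and edges[-1][2] <= x` (edges kept reversed: pop = head)
def pvWhile (st : List Int × List Int × Int) (rev : List (Int × Int × Int)) (x : Int) :
    (List Int × List Int × Int) × List (Int × Int × Int) :=
  match rev with
  | [] => (st, [])
  | e :: rest => if e.2.2 ≤ x then pvWhile (pvStep st e) rest x else (st, e :: rest)

-- A's outer `for ind, x in queries` loop
def pvALoop (st : List Int × List Int × Int) (rev : List (Int × Int × Int))
    (res : List Int) : List (Int × Int) → List Int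
  | [] => res
  | p :: rest =>
    let w := pvWhile st rev p.2
    pvALoop w.1 w.2 (res.set p.1.toNat w.1.2.2) rest

def maximumWeight (n : Int) (edges : List (Int × Int × Int)) (q : Int) (queries : List Int) : List Int :=
  let uf := (List.range n.toNat).map (fun i => (i : Int))
  let sz := List.replicate n.toNat (1 : Int)
  let sortedE := PySem.List.sorted edges (fun x => x.2.2) true
  let sq := PySem.List.sorted (PySem.List.enumerate queries) (fun x => x.2)
  pvALoop (uf, sz, 0) sortedE.reverse (List.replicate q.toNat 0) sq

-- ===== PORT B =====
-- one pass over the relevant edges (break at the first weight above the cutoff),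
-- recording (weight, running pair count) after each edge
def pvTableCut (cutoff : Int) (st : List Int × List Int × Int) :
    List (Int × Int × Int) → List (Int × Int)
  | [] => []
  | e :: rest =>
    if e.2.2 > cutoff then []
    else
      let st' := pvStep st e
      (e.2.2, st'.2.2) :: pvTableCut cutoff st' rest

-- per-query scan of the table: for w, c in table: if w > x: break; ans = c
def pvScan (t : List (Int × Int)) (x : Int) (ans : Int) : Int :=
  match t with
  | [] => ans
  | (w, c) :: rest => if w > x then ans else pvScan rest x c

def maximumWeight_alt (n : Int) (edges : List (Int × Int × Int)) (q : Int) (queries : List Int) : List Int :=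
  let uf := (List.range n.toNat).map (fun i => (i : Int))
  let sz := List.replicate n.toNat (1 : Int)
  let sortedE := PySem.List.sorted edges (fun x => x.2.2) true
  let res0 := List.replicate q.toNat 0
  match PySem.List.max? queries (fun x => x) with
  | none => res0
  | some cutoff =>
    let table := pvTableCut cutoff (uf, sz, 0) sortedE.reverse
    (PySem.List.enumerate queries).foldl
      (fun r p => r.set p.1.toNat (pvScan table p.2 0)) res0

-- ===== PRECONDITION & SPEC =====
-- Pre_ excludes exactly the inputs on which A raises IndexError (B raises there too):
-- a declared count q smaller than len(queries), or an edge that some query makes the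
-- union-find touch (its weight ≤ some query) whose endpoint is outside Python's valid
-- index range [1-n, n].
def Pre_maximumWeight (n : Int) (edges : List (Int × Int × Int)) (q : Int) (queries : List Int) : Prop :=
  (queries.length : Int) ≤ q ∧
  ∀ e ∈ edges, (∃ x ∈ queries, e.2.2 ≤ x) →
    ((1 - n ≤ e.1 ∧ e.1 ≤ n) ∧ (1 - n ≤ e.2.1 ∧ e.2.1 ≤ n))
instance (n : Int) (edges : List (Int × Int × Int)) (q : Int) (queries : List Int) : Decidable (Pre_maximumWeight n edges q queries) := by unfold Pre_maximumWeight; infer_instance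

def pvWitness_maximumWeight : Int × (List (Int × Int × Int)) × Int × List Int :=
  (3, [(1, 2, 5), (2, 3, 7)], 2, [4, 6])

def Spec_maximumWeight (n : Int) (edges : List (Int × Int × Int)) (q : Int) (queries : List Int) (out : List Int) : Prop := out = maximumWeight_alt n edges q queries
instance (n : Int) (edges : List (Int × Int × Int)) (q : Int) (queries : List Int) (out : List Int) : Decidable (Spec_maximumWeight n edges q queries out) := by unfold Spec_maximumWeight; infer_instance

-- ===== CLAIM (what is proved, stated in full; the proofs are below) =====
def Claim_equal_maximumWeight : Prop := ∀ (n : Int) (edges : List (Int × Int × Int)) (q : Int) (queries : List Int), Dom_maximumWeight n edges q queries → Pre_maximumWeight n edges q queries → Spec_maximumWeight n edges q queries (maximumWeight n edges q queries)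

-- ===== LEMMAS AND PROOFS =====

-- the while loop processes exactly the weight-≤-x prefix of the remaining edges
theorem pvWhile_eq (x : Int) : ∀ (rev : List (Int × Int × Int)) (st : List Int × List Int × Int),
    pvWhile st rev x =
      (List.foldl pvStep st (rev.takeWhile (fun e => decide (e.2.2 ≤ x))),
       rev.dropWhile (fun e => decide (e.2.2 ≤ x))) := by
  intro rev
  induction rev with
  | nil => intro st; simp [pvWhile]
  | cons e rest ih =>
    intro st
    by_cases h : e.2.2 ≤ x <;> simp [pvWhile, h, ih]

theorem takeWhile_sat_append {α : Type} (p : α → Bool) :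
    ∀ (done rem : List α), (∀ e ∈ done, p e) →
      (done ++ rem).takeWhile p = done ++ rem.takeWhile p := by
  intro done
  induction done with
  | nil => simp
  | cons a t ih =>
    intro rem h
    have ha : p a := h a (by simp)
    simp [ha, ih rem (fun e he => h e (by simp [he]))]

theorem dropWhile_sat_append {α : Type} (p : α → Bool) :
    ∀ (done rem : List α), (∀ e ∈ done, p e) →
      (done ++ rem).dropWhile p = rem.dropWhile p := by
  intro done
  induction done with
  | nil => simp
  | cons a t ih =>
    intro rem h
    have ha : p a := h a (by simp)
    simp [ha, ih rem (fun e he => h e (by simp [he]))]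

theorem mem_takeWhile_pred {α : Type} (p : α → Bool) :
    ∀ (l : List α) (x : α), x ∈ l.takeWhile p → p x = true := by
  intro l
  induction l with
  | nil => simp
  | cons a t ih =>
    intro x hx
    rw [List.takeWhile_cons] at hx
    split at hx
    · rcases List.mem_cons.mp hx with rfl | h
      · assumption
      · exact ih x h
    · simp at hx

-- the outer loop, with `done` the already-consumed prefix of the edge list
theorem pvALoop_spec (st0 : List Int × List Int × Int) :
    ∀ (qs : List (Int × Int)) (done rem : List (Int × Int × Int)) (res : List Int),
      qs.Pairwise (fun a b => a.2 ≤ b.2) →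
      (∀ p ∈ qs, ∀ e ∈ done, e.2.2 ≤ p.2) →
      pvALoop (List.foldl pvStep st0 done) rem res qs =
        qs.foldl (fun r p =>
          r.set p.1.toNat
            (List.foldl pvStep st0 ((done ++ rem).takeWhile (fun e => decide (e.2.2 ≤ p.2)))).2.2) res := by
  intro qs
  induction qs with
  | nil => intro done rem res _ _; rfl
  | cons p rest ih =>
    intro done rem res hpw hdone
    have hdp : ∀ e ∈ done, (fun e => decide (e.2.2 ≤ p.2)) e = true := by
      intro e he; simp [hdone p (by simp) e he]
    have htk := takeWhile_sat_append (fun e => decide (e.2.2 ≤ p.2)) done rem hdp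
    have hdk := dropWhile_sat_append (fun e => decide (e.2.2 ≤ p.2)) done rem hdp
    have hsplit : (done ++ rem.takeWhile (fun e => decide (e.2.2 ≤ p.2))) ++
        rem.dropWhile (fun e => decide (e.2.2 ≤ p.2)) = done ++ rem := by
      rw [List.append_assoc, List.takeWhile_append_dropWhile]
    have hrest : ∀ p' ∈ rest, ∀ e ∈ done ++ rem.takeWhile (fun e => decide (e.2.2 ≤ p.2)), e.2.2 ≤ p'.2 := by
      intro p' hp' e he
      rcases List.mem_append.mp he with h | h
      · exact hdone p' (by simp [hp']) e h
      · have h1 : decide (e.2.2 ≤ p.2) = true := mem_takeWhile_pred (fun e => decide (e.2.2 ≤ p.2)) rem e h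
        have h2 : p.2 ≤ p'.2 := (List.pairwise_cons.mp hpw).1 p' hp'
        exact le_trans (of_decide_eq_true h1) h2
    have hpw' : rest.Pairwise (fun a b => a.2 ≤ b.2) := (List.pairwise_cons.mp hpw).2
    calc pvALoop (List.foldl pvStep st0 done) rem res (p :: rest)
        = pvALoop (List.foldl pvStep st0 (done ++ rem.takeWhile (fun e => decide (e.2.2 ≤ p.2))))
            (rem.dropWhile (fun e => decide (e.2.2 ≤ p.2)))
            (res.set p.1.toNat
              (List.foldl pvStep st0 ((done ++ rem).takeWhile (fun e => decide (e.2.2 ≤ p.2)))).2.2) rest := by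
          simp only [pvALoop, pvWhile_eq, List.foldl_append, htk]
      _ = _ := by
          rw [ih _ _ _ hpw' hrest]
          simp only [List.foldl_cons, hsplit]

-- setting index i is invisible to later folds that never touch i
theorem foldl_set_not_mem (g : Int → Int) :
    ∀ (l : List (Int × Int)) (r : List Int) (i : Nat), (∀ p ∈ l, p.1.toNat ≠ i) →
      (l.foldl (fun r p => r.set p.1.toNat (g p.2)) r)[i]? = r[i]? := by
  intro l
  induction l with
  | nil => intro r i _; rfl
  | cons a t ih =>
    intro r i h
    rw [List.foldl_cons, ih _ _ (fun p hp => h p (by simp [hp]))]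
    exact List.getElem?_set_ne (h a (by simp))

theorem foldl_set_mem (g : Int → Int) :
    ∀ (l : List (Int × Int)) (r : List Int) (k : Int) (x : Int),
      l.Pairwise (fun a b => a.1 ≠ b.1) → (∀ p ∈ l, 0 ≤ p.1) → (k, x) ∈ l → k.toNat < r.length →
      (l.foldl (fun r p => r.set p.1.toNat (g p.2)) r)[k.toNat]? = some (g x) := by
  intro l
  induction l with
  | nil => intro r k x _ _ h _; simp at h
  | cons a t ih =>
    intro r k x hpw hnn hmem hlen
    rcases List.mem_cons.mp hmem with h | h
    · subst h
      rw [List.foldl_cons]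
      have hnt : ∀ p ∈ t, p.1.toNat ≠ k.toNat := by
        intro p hp
        have h1 : k ≠ p.1 := (List.pairwise_cons.mp hpw).1 p hp
        have h2 : 0 ≤ p.1 := hnn p (by simp [hp])
        have h3 : 0 ≤ k := hnn (k, x) (by simp)
        omega
      rw [foldl_set_not_mem g t _ _ hnt]
      exact List.getElem?_set_self' .. |>.trans (by simp [hlen])
    · rw [List.foldl_cons]
      exact ih _ k x (List.pairwise_cons.mp hpw).2 (fun p hp => hnn p (by simp [hp])) h
        (by simpa using hlen)

-- scatter order does not matter: folding the sets over any permutation of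
-- enumerate(queries) gives the same list
theorem scatter_perm (g : Int → Int) (queries : List Int) (l : List (Int × Int))
    (hperm : l.Perm (PySem.List.enumerate queries)) (r0 : List Int)
    (hlen : queries.length ≤ r0.length) :
    l.foldl (fun r p => r.set p.1.toNat (g p.2)) r0 =
      (PySem.List.enumerate queries).foldl (fun r p => r.set p.1.toNat (g p.2)) r0 := by
  have hpwE : (PySem.List.enumerate queries (0 : Int)).Pairwise (fun a b => a.1 ≠ b.1) :=
    (PySem.List.pairwise_lt_enumerate queries 0).imp (fun h => ne_of_lt h)
  have hnnE : ∀ p ∈ PySem.List.enumerate queries (0 : Int), 0 ≤ p.1 := by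
    intro p hp
    rcases (PySem.List.mem_enumerate_iff _ _ _).mp hp with ⟨k, hk, rfl⟩
    simp
  have hpw : l.Pairwise (fun a b => a.1 ≠ b.1) :=
    (List.Perm.pairwise_iff (fun {a b} h => h.symm) hperm).mpr hpwE
  have hnn : ∀ p ∈ l, 0 ≤ p.1 := fun p hp => hnnE p (hperm.mem_iff.mp hp)
  apply List.ext_getElem?
  intro i
  by_cases hi : i < queries.length
  · have hmemE : ((i : Int), queries[i]) ∈ PySem.List.enumerate queries (0 : Int) :=
      (PySem.List.mem_enumerate_iff _ _ _).mpr ⟨i, hi, by simp⟩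
    have h1 := foldl_set_mem g l r0 (i : Int) queries[i] hpw hnn
      (hperm.mem_iff.mpr hmemE) (by simpa using lt_of_lt_of_le hi hlen)
    have h2 := foldl_set_mem g (PySem.List.enumerate queries) r0 (i : Int) queries[i]
      hpwE hnnE hmemE (by simpa using lt_of_lt_of_le hi hlen)
    have h3 : ((i : Int)).toNat = i := by simp
    rw [h3] at h1 h2
    rw [h1, h2]
  · have hno : ∀ m ∈ PySem.List.enumerate queries (0 : Int), m.1.toNat ≠ i := by
      intro m hm
      rcases (PySem.List.mem_enumerate_iff _ _ _).mp hm with ⟨k, hk, rfl⟩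
      simp
      omega
    rw [foldl_set_not_mem g l r0 i (fun p hp => hno p (hperm.mem_iff.mp hp)),
        foldl_set_not_mem g _ r0 i hno]

-- the two fold functions agree on every member of the list
theorem foldl_set_congr (f g' : Int × Int → Int) :
    ∀ (l : List (Int × Int)) (r : List Int), (∀ p ∈ l, f p = g' p) →
      l.foldl (fun r p => r.set p.1.toNat (f p)) r =
        l.foldl (fun r p => r.set p.1.toNat (g' p)) r := by
  intro l
  induction l with
  | nil => intro r _; rfl
  | cons a t ih =>
    intro r h
    simp only [List.foldl_cons, h a (by simp)]
    exact ih _ (fun p hp => h p (by simp [hp]))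

-- proof-side helper: the table of a whole edge list (no cutoff)
def pvTable (st : List Int × List Int × Int) : List (Int × Int × Int) → List (Int × Int)
  | [] => []
  | e :: rest =>
    let st' := pvStep st e
    (e.2.2, st'.2.2) :: pvTable st' rest

-- the cut loop is the full table of the weight-≤-cutoff prefix
theorem pvTableCut_eq (cutoff : Int) :
    ∀ (l : List (Int × Int × Int)) (st : List Int × List Int × Int),
      pvTableCut cutoff st l = pvTable st (l.takeWhile (fun e => decide (e.2.2 ≤ cutoff))) := by
  intro l
  induction l with
  | nil => intro st; simp [pvTableCut, pvTable]
  | cons e rest ih =>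
    intro st
    by_cases h : e.2.2 ≤ cutoff
    · have h' : ¬ e.2.2 > cutoff := not_lt.mpr h
      simp [pvTableCut, h, h', pvTable, ih]
    · have h' : e.2.2 > cutoff := lt_of_not_ge h
      simp [pvTableCut, h, h', pvTable]

theorem takeWhile_takeWhile_imp {α : Type} (p q : α → Bool) (himp : ∀ a, p a = true → q a = true) :
    ∀ (l : List α), (l.takeWhile q).takeWhile p = l.takeWhile p := by
  intro l
  induction l with
  | nil => rfl
  | cons a t ih =>
    by_cases hq : q a
    · by_cases hp : p a <;> simp [hq, hp, ih]
    · have hp : p a = false := by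
        by_contra h
        exact hq (himp a (by simpa using h))
      simp [hq, hp]

-- B's scan of the prefix table computes the same takeWhile fold
theorem pvScan_table (x : Int) : ∀ (l : List (Int × Int × Int)) (st : List Int × List Int × Int),
    pvScan (pvTable st l) x st.2.2 =
      (List.foldl pvStep st (l.takeWhile (fun e => decide (e.2.2 ≤ x)))).2.2 := by
  intro l
  induction l with
  | nil => intro st; simp [pvTable, pvScan]
  | cons e rest ih =>
    intro st
    by_cases h : e.2.2 ≤ x
    · have h' : ¬ e.2.2 > x := not_lt.mpr h
      simp [pvTable, pvScan, h, h', ih]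
    · have h' : e.2.2 > x := lt_of_not_ge h
      simp [pvTable, pvScan, h, h']

-- ===== VERDICT (by name: the statement is the Claim_ definition above) =====
theorem maximumWeight_spec : Claim_equal_maximumWeight := by
  intro n edges q queries _ hpre
  unfold Spec_maximumWeight maximumWeight maximumWeight_alt
  obtain ⟨hq, -⟩ := hpre
  set st0 : List Int × List Int × Int :=
    ((List.range n.toNat).map (fun i => (i : Int)), List.replicate n.toNat (1 : Int), 0) with hst0
  set asc := (PySem.List.sorted edges (fun x => x.2.2) true).reverse with hasc
  have hA := pvALoop_spec st0 (PySem.List.sorted (PySem.List.enumerate queries) (fun x => x.2))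
    [] asc (List.replicate q.toNat 0)
    (PySem.List.sorted_pairwise (PySem.List.enumerate queries) (fun x => x.2))
    (by intro p _ e he; simp at he)
  simp only [List.foldl_nil, List.nil_append] at hA
  rw [hA]
  cases hmax : PySem.List.max? queries (fun x => x) with
  | none =>
    have hqe : queries = [] := (PySem.List.max?_eq_none_iff _ _).mp hmax
    subst hqe
    simp [PySem.List.enumerate, PySem.List.sorted]
  | some cutoff =>
    have hle : ∀ y ∈ queries, y ≤ cutoff := by
      have := PySem.List.max?_isMax (xs := queries) (key := fun x => x) hmax
      simpa using this
    rw [scatter_perm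
      (fun x => (List.foldl pvStep st0 (asc.takeWhile (fun e => decide (e.2.2 ≤ x)))).2.2)
      queries _ (PySem.List.sorted_perm (PySem.List.enumerate queries) (fun x => x.2) false)
      (List.replicate q.toNat 0) (by simp; omega)]
    apply foldl_set_congr
    intro p hp
    have hp2 : p.2 ∈ queries := by
      rcases (PySem.List.mem_enumerate_iff _ _ _).mp hp with ⟨k, hk, rfl⟩
      simp
    have hcut : p.2 ≤ cutoff := hle p.2 hp2
    rw [pvTableCut_eq, pvScan_table p.2]
    rw [takeWhile_takeWhile_imp (fun (e : Int × Int × Int) => decide (e.2.2 ≤ p.2))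
      (fun (e : Int × Int × Int) => decide (e.2.2 ≤ cutoff))
      (by intro a ha; simp at ha ⊢; omega) asc]
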